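-- pv_equiv track=rewrite | github.com/gerlacdt/pytudes | sum_product_puzzle.py | statement12
-- ===== SOURCE A (Python) =====
-- from collections import Counter
--
-- def sum_pairs(n):
--     '''Returns all possible pairs (a,b) which a + b == n'''
--     return [(a, n-a) for a in range(2, int(n/2+1))]
--
-- def statement12(possible_pairs):
--     '''
--     1. Product says: i don't know the numbers.
--     2. Sum says: Product does not know X and Y.
--     '''
--     products_counts = Counter([a * b for a, b in possible_pairs])
--     uniq_products = set((a, b)
--                         for a, b in possible_pairs
--                         if products_counts[a * b] == 1)
--     s_pairs = [(a, b) for a, b in possible_pairs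
--                if all((x, y) not in uniq_products
--                       for (x, y) in sum_pairs(a + b))]
--     return s_pairs
-- ===== SOURCE B (Python) =====
-- from collections import Counter
--
-- def statement12(possible_pairs):
--     '''
--     1. Product says: i don't know the numbers.
--     2. Sum says: Product does not know X and Y.
--     '''
--     products_counts = Counter(a * b for a, b in possible_pairs)
--     # A sum s is "bad" iff some pair with a unique product is produced by
--     # sum_pairs(s), i.e. equals (x, s - x) with 2 <= x <= s // 2.
--     bad_sums = set()
--     for x, y in possible_pairs:
--         if products_counts[x * y] == 1 and 2 <= x <= (x + y) // 2:
--             bad_sums.add(x + y)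
--     return [(a, b) for a, b in possible_pairs if a + b not in bad_sums]
-- ===== Notes on version B (the rewrite author's own statement) =====
-- stated objective: faster
-- what changed: Instead of scanning all of sum_pairs(a+b) for every pair, B derives the set of 'bad' sums directly from the unique-product pairs (a pair (x,y) is hit by sum_pairs(s) iff s = x+y and 2 <= x <= s//2), then filters by one set lookup per pair.
import Mathlib
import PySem

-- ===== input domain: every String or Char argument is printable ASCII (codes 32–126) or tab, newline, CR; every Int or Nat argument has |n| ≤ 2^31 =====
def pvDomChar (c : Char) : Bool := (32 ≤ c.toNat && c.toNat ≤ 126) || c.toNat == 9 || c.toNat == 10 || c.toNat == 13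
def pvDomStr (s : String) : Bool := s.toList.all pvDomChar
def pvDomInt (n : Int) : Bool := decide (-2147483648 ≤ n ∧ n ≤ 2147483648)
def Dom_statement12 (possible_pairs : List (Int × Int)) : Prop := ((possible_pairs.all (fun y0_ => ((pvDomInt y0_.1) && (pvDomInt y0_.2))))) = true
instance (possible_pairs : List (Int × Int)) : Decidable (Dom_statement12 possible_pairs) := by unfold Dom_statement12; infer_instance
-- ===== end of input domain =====

-- B replaces A's per-pair scan of all of sum_pairs(a+b) by one precomputed set of "bad" sums
-- read off the unique-product pairs themselves (objective: faster, asymptotic).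

-- ===== PORT A =====
-- sum_pairs(n): int(n/2+1) is float arithmetic, exact on the domain (|n| ≤ 2^32 fits a double);
-- n/2+1 = (n+2)/2 exactly, and int() truncates toward zero = Int.tdiv.
def sumPairsA (n : Int) : List (Int × Int) :=
  (PySem.List.pyRange 2 ((n + 2).tdiv 2) 1).map (fun a => (a, n - a))

def statement12 (possible_pairs : List (Int × Int)) : List (Int × Int) :=
  let products_counts := PySem.Dict.counter (possible_pairs.map (fun p => p.1 * p.2))
  let uniq_products : PySem.Set (Int × Int) :=
    PySem.Set.ofList (possible_pairs.filter (fun p => products_counts.getD (p.1 * p.2) 0 == 1))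
  possible_pairs.filter (fun p =>
    (sumPairsA (p.1 + p.2)).all (fun q => !(PySem.Set.contains uniq_products q)))

-- ===== PORT B =====
def statement12_alt (possible_pairs : List (Int × Int)) : List (Int × Int) :=
  let products_counts := PySem.Dict.counter (possible_pairs.map (fun p => p.1 * p.2))
  let bad_sums : PySem.Set Int :=
    possible_pairs.foldl (fun s p =>
      if (products_counts.getD (p.1 * p.2) 0 == 1)
          && (decide (2 ≤ p.1)) && (decide (p.1 ≤ PySem.Int.floordiv (p.1 + p.2) 2))
      then PySem.Set.add s (p.1 + p.2) else s) PySem.Set.empty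
  possible_pairs.filter (fun p => !(PySem.Set.contains bad_sums (p.1 + p.2)))

-- ===== PRECONDITION & SPEC =====
def Spec_statement12 (possible_pairs : List (Int × Int)) (out : List (Int × Int)) : Prop := out = statement12_alt possible_pairs
instance (possible_pairs : List (Int × Int)) (out : List (Int × Int)) : Decidable (Spec_statement12 possible_pairs out) := by unfold Spec_statement12; infer_instance

-- ===== CLAIM (what is proved, stated in full; the proofs are below) =====
def Claim_equal_statement12 : Prop := ∀ (possible_pairs : List (Int × Int)), Dom_statement12 possible_pairs → Spec_statement12 possible_pairs (statement12 possible_pairs)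

-- ===== LEMMAS AND PROOFS =====

-- x ranges over sum_pairs(s) (A's bound, truncating division) iff 2 ≤ x ≤ s // 2 (B's bound).
lemma pv_bound_iff (s x : Int) : (2 ≤ x ∧ x < (s + 2).tdiv 2) ↔ (2 ≤ x ∧ x ≤ PySem.Int.floordiv s 2) := by
  simp only [PySem.Int.floordiv]
  rw [Int.tdiv_eq_ediv, Int.fdiv_eq_ediv_of_nonneg s (by norm_num), show Int.sign 2 = 1 from rfl]
  split_ifs with h
  · rcases h with h | h <;> omega
  · simp only [not_or] at h
    omega

-- membership in B's bad_sums fold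
lemma pv_mem_bad (C : PySem.Dict Int Int) (l : List (Int × Int)) (acc : PySem.Set Int) (y : Int) :
    y ∈ l.foldl (fun s p =>
        if (C.getD (p.1 * p.2) 0 == 1)
            && (decide (2 ≤ p.1)) && (decide (p.1 ≤ PySem.Int.floordiv (p.1 + p.2) 2))
        then PySem.Set.add s (p.1 + p.2) else s) acc ↔
      y ∈ acc ∨ ∃ p ∈ l, C.getD (p.1 * p.2) 0 = 1 ∧ 2 ≤ p.1 ∧
        p.1 ≤ PySem.Int.floordiv (p.1 + p.2) 2 ∧ y = p.1 + p.2 := by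
  induction l generalizing acc with
  | nil => simp
  | cons a t ih =>
    simp only [List.foldl_cons, ih, List.mem_cons]
    split_ifs with h
    · simp only [Bool.and_eq_true, decide_eq_true_eq, beq_iff_eq] at h
      simp only [PySem.Set.mem_add]
      constructor
      · rintro ((hy | rfl) | ⟨q, hq, hcond⟩)
        · exact Or.inl hy
        · exact Or.inr ⟨a, Or.inl rfl, h.1.1, h.1.2, h.2, rfl⟩
        · exact Or.inr ⟨q, Or.inr hq, hcond⟩
      · rintro (hy | ⟨q, (rfl | hq), hcond⟩)
        · exact Or.inl (Or.inl hy)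
        · exact Or.inl (Or.inr hcond.2.2.2)
        · exact Or.inr ⟨q, hq, hcond⟩
    · simp only [Bool.and_eq_true, decide_eq_true_eq, beq_iff_eq] at h
      constructor
      · rintro (hy | ⟨q, hq, hcond⟩)
        · exact Or.inl hy
        · exact Or.inr ⟨q, Or.inr hq, hcond⟩
      · rintro (hy | ⟨q, (rfl | hq), hcond⟩)
        · exact Or.inl hy
        · exact absurd ⟨⟨hcond.1, hcond.2.1⟩, hcond.2.2.1⟩ h
        · exact Or.inr ⟨q, hq, hcond⟩

theorem pv_main (pp : List (Int × Int)) : statement12 pp = statement12_alt pp := by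
  unfold statement12 statement12_alt
  simp only []
  apply List.filter_congr
  intro p _hp
  set C := PySem.Dict.counter (pp.map (fun p => p.1 * p.2)) with hC
  set s := p.1 + p.2 with hs
  apply Bool.eq_iff_iff.mpr
  simp only [List.all_eq_true, ← Bool.not_eq_true, PySem.Set.contains_eq_listContains,
    List.contains_iff_mem, Bool.not_eq_eq_eq_not, Bool.not_true]
  rw [pv_mem_bad C pp PySem.Set.empty s]
  simp only [PySem.Set.mem_ofList, List.mem_filter, sumPairsA, List.mem_map,
    PySem.List.mem_pyRange_one, beq_iff_eq, PySem.Set.empty, List.not_mem_nil, false_or,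
    not_exists, not_and]
  constructor
  · intro h q hq hc h2 hle heq
    have hb := (pv_bound_iff (q.1 + q.2) q.1).2 ⟨h2, hle⟩
    exact h (q.1, q.2) ⟨q.1, by rw [heq]; exact hb, by rw [heq]; simp⟩
      (by simpa using hq) (by simpa using hc)
  · intro h x hex hx hc
    obtain ⟨a, ha, rfl⟩ := hex
    have hb := (pv_bound_iff s a).1 ha
    exact h (a, s - a) hx hc hb.1 (by simpa using hb.2) (by ring)

-- ===== VERDICT (by name: the statement is the Claim_ definition above) =====
theorem statement12_spec : Claim_equal_statement12 := by
  intro pp _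
  unfold Spec_statement12
  exact pv_main pp
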